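-- pv_equiv track=rewrite | github.com/Sin-lucky/SEAD-SD | SEAD-SD encryption system2.0.py | re_wy
-- ===== SOURCE A (Python) =====
-- def re_wy(a,b):#a is text of Meandering encryption, b is encryption times
--     awnser=''#define answer variable
--     wide_1=int(len(a)/2)
--     if (len(a)/2)-int(len(a)/2)>0:
--         a+='#'
--         wide_1=int(len(a)/2)
--     b=int(b)
--     for times_1 in range(b):
--         for times in range(0,wide_1):
--             awnser+=a[times::wide_1]
--         times_1+=1
--     awnser=awnser.rstrip('#')#remove #
--     return awnser#Decryption Meandering encryption
-- ===== SOURCE B (Python) =====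
-- def re_wy(a, b):
--     # Direct index map: the i-th output character is computed in closed form
--     # from its position, with no intermediate transform string and no repetition:
--     # within each round of length L = 2*w, position i reads pad[(i % L)//2 + (i % 2)*w].
--     n = len(a)
--     w = (n + 1) // 2
--     L = 2 * w
--     pad = a + '#' * (L - n)
--     out = ''.join(pad[(i % L) // 2 + (i % 2) * w] for i in range(L * int(b)))
--     return out.rstrip('#')
-- ===== Notes on version B (the rewrite author's own statement) =====
-- stated objective: alternative
-- what changed: B computes each output character directly from its position by a closed-form index map pad[(i % L)//2 + (i % 2)*w] over a single flat range, instead of A's nested rounds-by-columns loops that accumulate stride slices by repeated string concatenation.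
import Mathlib
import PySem

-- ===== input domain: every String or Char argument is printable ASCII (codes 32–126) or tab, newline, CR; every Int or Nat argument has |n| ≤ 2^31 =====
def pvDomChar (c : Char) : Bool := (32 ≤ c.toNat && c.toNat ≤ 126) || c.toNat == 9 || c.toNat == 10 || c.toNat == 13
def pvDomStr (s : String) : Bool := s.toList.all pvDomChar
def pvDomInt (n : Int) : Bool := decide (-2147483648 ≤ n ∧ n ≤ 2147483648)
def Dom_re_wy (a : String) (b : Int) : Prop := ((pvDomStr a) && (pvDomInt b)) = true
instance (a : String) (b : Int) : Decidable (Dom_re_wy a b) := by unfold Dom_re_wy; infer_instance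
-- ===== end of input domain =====

-- ===== PORT A =====
-- B differs from A by computing each output character directly from its position
-- via a closed-form index map (no intermediate transform string, no accumulation
-- of stride slices); objective: alternative decomposition.

-- shared helper: s.rstrip('#') — exact: drops exactly the trailing '#' characters
def rstripHash (cs : List Char) : List Char := (cs.reverse.dropWhile (· == '#')).reverse

def re_wy (a : String) (b : Int) : String :=
  let a0 := a.toList
  -- '(len(a)/2)-int(len(a)/2)>0' ⟺ len(a) is odd (len ≥ 0), ported as len % 2 > 0
  let a1 := if 0 < PySem.Int.mod (PySem.List.len a0) 2 then a0 ++ ['#'] else a0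
  let wide_1 := PySem.Int.floordiv (PySem.List.len a1) 2
  let awnser := (PySem.List.pyRange 0 b 1).foldl
      (fun acc _ => (PySem.List.pyRange 0 wide_1 1).foldl
        (fun acc2 times =>
          -- a[times::wide_1]; the .getD [] guard is never reached (0 ≤ times < wide_1 so step ≠ 0)
          acc2 ++ (PySem.List.slice? a1 (some times) none wide_1).getD []) acc) []
  String.ofList (rstripHash awnser)

-- ===== PORT B =====
def re_wy_alt (a : String) (b : Int) : String :=
  let cs := a.toList
  let n := cs.length
  let w := (n + 1) / 2
  let L := 2 * w
  let pad := cs ++ List.replicate (L - n) '#'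
  -- range(L * int(b)) is empty for b ≤ 0, hence L * b.toNat; both indices always in range
  let out := (List.range (L * b.toNat)).map
      (fun i => PySem.List.pyGetD pad (((i % L) / 2 + (i % 2) * w : Nat) : Int) '#')
  String.ofList (rstripHash out)

-- ===== PRECONDITION & SPEC =====
def Spec_re_wy (a : String) (b : Int) (out : String) : Prop := out = re_wy_alt a b
instance (a : String) (b : Int) (out : String) : Decidable (Spec_re_wy a b out) := by unfold Spec_re_wy; infer_instance

-- ===== CLAIM (what is proved, stated in full; the proofs are below) =====
def Claim_equal_re_wy : Prop := ∀ (a : String) (b : Int), Dom_re_wy a b → Spec_re_wy a b (re_wy a b)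

-- ===== LEMMAS AND PROOFS =====

-- a[j::w] on a list of length 2*w with 0 ≤ j < w is exactly the column pair [a[j], a[j+w]]
theorem slice_pair (p : List Char) (w j : Nat) (hw : 0 < w) (hj : j < w) (hl : p.length = 2*w) :
    PySem.List.slice? p (some (j:Int)) none (w:Int) = some [p.getD j '#', p.getD (j+w) '#'] := by
  unfold PySem.List.slice? PySem.List.sliceIndices
  have hst : ¬ ((w:Int) = 0) := by omega
  have hneg : ¬ ((w:Int) < 0) := by omega
  have hjpos : ¬ ((j:Int) < 0) := by omega
  have hpos : (0:Int) < w := by omega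
  have hje : ((j:Int)) < (p.length:Int) := by omega
  have hmin : min (j:Int) (p.length:Int) = j := by omega
  have hcount : ((p.length:Int) - (j:Int) + (w:Int) - 1) / (w:Int) = 2 := by
    have h1 : ((p.length:Int) - j + w - 1) = (w - 1 - j) + (w:Int) * 2 := by omega
    rw [h1, Int.add_mul_ediv_left _ _ hst, Int.ediv_eq_zero_of_lt (by omega) (by omega)]; ring
  simp only [hst, hneg, hjpos, if_false, hpos, if_true, hmin, hje, hcount]
  show some _ = _
  norm_num [List.range_succ]
  have e1 : ((j:Int) + (w:Int)).toNat = j + w := by omega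
  have g0 : p[j]? = some (p[j]'(by omega)) := List.getElem?_eq_getElem (by omega)
  have g1 : p[j+w]? = some (p[j+w]'(by omega)) := List.getElem?_eq_getElem (by omega)
  simp [List.filterMap, show Int.toNat 2 = 2 from rfl, List.range_succ, e1, g0, g1]

-- appending a fixed list once per loop iteration is list repetition
theorem fold_append_const {α : Type} (t : List Char) (l : List α) (acc : List Char) :
    l.foldl (fun acc _ => acc ++ t) acc = acc ++ (List.replicate l.length t).flatten := by
  induction l generalizing acc with
  | nil => simp
  | cons x xs ih => simp [ih, List.replicate_succ]

theorem pyRange_length (b : Int) :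
    (PySem.List.pyRange 0 b 1).length = b.toNat := by
  rw [PySem.List.pyRange_of_pos 0 b (by norm_num)]
  by_cases hb : (0:Int) < b
  · simp [hb]
  · simp [hb]
    omega

-- A's whole loop body, on the padded list: b copies of the column-pair interleave
theorem core (p : List Char) (w : Nat) (hl : p.length = 2*w) (b : Int) :
    (PySem.List.pyRange 0 b 1).foldl
      (fun acc _ => (PySem.List.pyRange 0 (w:Int) 1).foldl
        (fun acc2 times =>
          acc2 ++ (PySem.List.slice? p (some times) none (w:Int)).getD []) acc) []
    = (List.replicate b.toNat
        ((List.range w).flatMap (fun j => [p.getD j '#', p.getD (j+w) '#']))).flatten := by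
  have inner : ∀ acc : List Char,
      (PySem.List.pyRange 0 (w:Int) 1).foldl
        (fun acc2 times =>
          acc2 ++ (PySem.List.slice? p (some times) none (w:Int)).getD []) acc
      = acc ++ (List.range w).flatMap (fun j => [p.getD j '#', p.getD (j+w) '#']) := by
    intro acc
    rw [PySem.List.pyRange_zero_natCast, List.foldl_map]
    rw [PySem.List.foldl_congr_mem (List.range w)
      (fun acc2 (j : Nat) => acc2 ++ (PySem.List.slice? p (some (j:Int)) none (w:Int)).getD [])
      (fun acc2 (j : Nat) => acc2 ++ [p.getD j '#', p.getD (j+w) '#']) acc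
      (by
        intro acc2 j hj
        have hjw : j < w := List.mem_range.mp hj
        dsimp only
        rw [slice_pair p w j (by omega) hjw hl]
        rfl)]
    exact PySem.List.foldl_append_eq_flatMap _ _ acc
  calc (PySem.List.pyRange 0 b 1).foldl
        (fun acc _ => (PySem.List.pyRange 0 (w:Int) 1).foldl
          (fun acc2 times =>
            acc2 ++ (PySem.List.slice? p (some times) none (w:Int)).getD []) acc) []
      = (PySem.List.pyRange 0 b 1).foldl
        (fun acc _ => acc ++ (List.range w).flatMap
            (fun j => [p.getD j '#', p.getD (j+w) '#'])) [] := by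
        exact PySem.List.foldl_congr_mem _ _ _ [] (by intro acc x _; exact inner acc)
    _ = _ := by rw [fold_append_const, pyRange_length]; exact List.nil_append _

-- one round of B's index map is exactly the column-pair interleave
theorem block_map (p : List Char) (w m : Nat) (hm : m ≤ w) :
    (List.range (2*m)).map
      (fun i => p.getD ((i % (2*w)) / 2 + (i % 2) * w) '#')
    = (List.range m).flatMap (fun j => [p.getD j '#', p.getD (j+w) '#']) := by
  induction m with
  | zero => simp
  | succ k ih =>
    have h2 : 2*(k+1) = (2*k) + 1 + 1 := by omega
    rw [h2, List.range_succ, List.range_succ, List.range_succ]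
    rw [List.map_append, List.map_append, ih (by omega), List.flatMap_append]
    have e1 : (2*k) % (2*w) = 2*k := Nat.mod_eq_of_lt (by omega)
    have e2 : (2*k+1) % (2*w) = 2*k+1 := Nat.mod_eq_of_lt (by omega)
    have d1 : (2*k) / 2 = k := by omega
    have d2 : (2*k+1) / 2 = k := by omega
    have d3 : (2*k) % 2 = 0 := by omega
    have d4 : (2*k+1) % 2 = 1 := by omega
    simp [e1, e2, d1, d2, d3, d4]

-- B's full index map over range(2*w*k) is k copies of the interleave
theorem repeat_map (p : List Char) (w k : Nat) :
    (List.range (2*w*k)).map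
      (fun i => p.getD ((i % (2*w)) / 2 + (i % 2) * w) '#')
    = (List.replicate k
        ((List.range w).flatMap (fun j => [p.getD j '#', p.getD (j+w) '#']))).flatten := by
  induction k with
  | zero => simp
  | succ m ih =>
    have h : 2*w*(m+1) = 2*w*m + 2*w := by ring
    rw [h, List.range_add, List.map_append, ih, List.map_map]
    have hshift : ((fun i => p.getD ((i % (2*w)) / 2 + (i % 2) * w) '#') ∘ (fun i => 2*w*m + i))
        = fun i : Nat => p.getD (((2*w*m + i) % (2*w)) / 2 + ((2*w*m + i) % 2) * w) '#' := rfl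
    rw [hshift]
    have hcong : (List.range (2*w)).map
        (fun i : Nat => p.getD (((2*w*m + i) % (2*w)) / 2 + ((2*w*m + i) % 2) * w) '#')
      = (List.range (2*w)).map
        (fun i : Nat => p.getD ((i % (2*w)) / 2 + (i % 2) * w) '#') := by
      apply List.map_congr_left
      intro i hi
      have hi' : i < 2*w := List.mem_range.mp hi
      have m1 : (2*w*m + i) % (2*w) = i % (2*w) := by
        rw [Nat.add_comm]; exact Nat.add_mul_mod_self_left i (2*w) m
      have m2 : (2*w*m + i) % 2 = i % 2 := by
        have hr : 2*w*m = 2*(w*m) := by ring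
        rw [hr]; omega
      rw [m1, m2]
    rw [hcong, block_map p w w (le_refl w)]
    rw [show m + 1 = m + 1 from rfl, List.replicate_succ']
    simp

-- ===== VERDICT (by name: the statement is the Claim_ definition above) =====
theorem re_wy_spec : Claim_equal_re_wy := by
  intro a b _
  unfold Spec_re_wy re_wy re_wy_alt
  set a0 := a.toList with ha0
  have hmod : PySem.Int.mod (PySem.List.len a0) 2 = ((a0.length % 2 : Nat) : Int) := by
    simp [PySem.List.len_eq]
  have hcond : (0 < PySem.Int.mod (PySem.List.len a0) 2) ↔ (a0.length % 2 = 1) := by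
    rw [hmod]; omega
  by_cases hpar : a0.length % 2 = 1
  · simp only [if_pos (hcond.mpr hpar)]
    set n := a0.length with hn
    set w := (n + 1) / 2 with hw
    have hpadlen : 2 * w - n = 1 := by omega
    set p := a0 ++ ['#'] with hp
    have hpB : a0 ++ List.replicate (2*w - n) '#' = p := by rw [hpadlen]; rfl
    have hl : p.length = 2 * w := by simp [hp]; omega
    have hflo : PySem.Int.floordiv (PySem.List.len p) 2 = ((w : Nat) : Int) := by
      simp [PySem.List.len_eq, hl]
    rw [hflo, core p w hl b, hpB]
    simp only [PySem.List.pyGetD_natCast]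
    rw [repeat_map p w b.toNat]
  · simp only [if_neg (fun h => hpar (hcond.mp h))]
    set n := a0.length with hn
    set w := (n + 1) / 2 with hw
    have hweq : w = n / 2 := by omega
    have hpadlen : 2 * w - n = 0 := by omega
    have hpB : a0 ++ List.replicate (2*w - n) '#' = a0 := by rw [hpadlen]; simp
    have hl : a0.length = 2 * w := by omega
    have hflo : PySem.Int.floordiv (PySem.List.len a0) 2 = ((w : Nat) : Int) := by
      simp [PySem.List.len_eq]
      omega
    rw [hflo, core a0 w hl b, hpB]
    simp only [PySem.List.pyGetD_natCast]
    rw [repeat_map a0 w b.toNat]
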